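-- pv_equiv track=rewrite | github.com/dainsiahtill-dev/Polaris | src/backend/polaris/kernelone/editing/patch_engine.py | _split_update_hunks
-- ===== SOURCE A (Python) =====
-- def _split_update_hunks(lines: list[str]) -> list[list[str]]:
--     hunks: list[list[str]] = []
--     current: list[str] = []
--     for line in lines:
--         if line.startswith("@@"):
--             if current:
--                 hunks.append(current)
--                 current = []
--             continue
--         current.append(line)
--     if current:
--         hunks.append(current)
--     return hunks
-- ===== SOURCE B (Python) =====
-- from itertools import groupby
--
--
-- def _split_update_hunks(lines: list[str]) -> list[list[str]]:
--     return [list(g) for k, g in groupby(lines, key=lambda ln: ln.startswith("@@")) if not k]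
-- ===== Notes on version B (the rewrite author's own statement) =====
-- stated objective: idiomatic
-- what changed: Replaces the manual accumulator loop with itertools.groupby partitioning the lines into maximal marker/non-marker runs and a comprehension keeping the non-marker runs.
import Mathlib
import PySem

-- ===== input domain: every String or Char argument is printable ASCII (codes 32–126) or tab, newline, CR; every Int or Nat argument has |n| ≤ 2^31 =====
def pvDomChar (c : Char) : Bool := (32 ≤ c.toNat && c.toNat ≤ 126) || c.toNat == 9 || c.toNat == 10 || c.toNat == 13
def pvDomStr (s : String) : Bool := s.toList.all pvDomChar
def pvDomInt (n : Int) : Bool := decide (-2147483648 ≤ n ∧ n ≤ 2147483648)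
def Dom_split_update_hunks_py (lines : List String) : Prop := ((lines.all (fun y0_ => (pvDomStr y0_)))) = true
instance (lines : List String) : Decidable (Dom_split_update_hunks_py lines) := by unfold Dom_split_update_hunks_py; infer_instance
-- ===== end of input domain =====

-- B replaces A's manual accumulator loop by grouping the lines into maximal
-- marker/non-marker runs (itertools.groupby) and keeping the non-marker runs;
-- same O(n) cost, more idiomatic decomposition.

-- ===== PORT A =====
-- A's for-loop over (hunks, current), then the trailing 'if current' flush.
def split_update_hunks_py (lines : List String) : List (List String) :=
  let st := lines.foldl
    (fun (st : List (List String) × List String) line =>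
      if PySem.Str.startswith line "@@" then
        if st.2 ≠ [] then (st.1 ++ [st.2], ([] : List String)) else st
      else
        (st.1, st.2 ++ [line]))
    (([], []) : List (List String) × List String)
  if st.2 ≠ [] then st.1 ++ [st.2] else st.1

-- ===== PORT B =====
-- itertools.groupby: split into maximal runs of equal key (startswith "@@").
def pvGroupRuns (lines : List String) : List (Bool × List String) :=
  match lines with
  | [] => []
  | x :: xs =>
    let k := PySem.Str.startswith x "@@"
    let p := xs.span (fun y => PySem.Str.startswith y "@@" == k)
    (k, x :: p.1) :: pvGroupRuns p.2
termination_by lines.length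
decreasing_by
  simp only [List.span_eq_takeWhile_dropWhile]
  exact Nat.lt_succ_of_le (List.length_dropWhile_le _ _)

-- the comprehension: [list(g) for k, g in groupby(...) if not k]
def split_update_hunks_py_alt (lines : List String) : List (List String) :=
  ((pvGroupRuns lines).filter (fun p => !p.1)).map (·.2)

-- ===== PRECONDITION & SPEC =====
def Spec_split_update_hunks_py (lines : List String) (out : List (List String)) : Prop := out = split_update_hunks_py_alt lines
instance (lines : List String) (out : List (List String)) : Decidable (Spec_split_update_hunks_py lines out) := by unfold Spec_split_update_hunks_py; infer_instance

-- ===== CLAIM (what is proved, stated in full; the proofs are below) =====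
def Claim_equal_split_update_hunks_py : Prop := ∀ (lines : List String), Dom_split_update_hunks_py lines → Spec_split_update_hunks_py lines (split_update_hunks_py lines)

-- ===== LEMMAS AND PROOFS =====

-- reference function: what A's loop computes starting from current = cur
def pvRef (lines : List String) (cur : List String) : List (List String) :=
  match lines with
  | [] => if cur ≠ [] then [cur] else []
  | x :: xs =>
    if PySem.Str.startswith x "@@" then
      if cur ≠ [] then cur :: pvRef xs [] else pvRef xs []
    else
      pvRef xs (cur ++ [x])

lemma pvA_foldl (lines : List String) :
    ∀ (hunks : List (List String)) (cur : List String),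
    (let st := lines.foldl
      (fun (st : List (List String) × List String) line =>
        if PySem.Str.startswith line "@@" then
          if st.2 ≠ [] then (st.1 ++ [st.2], ([] : List String)) else st
        else
          (st.1, st.2 ++ [line])) (hunks, cur)
     if st.2 ≠ [] then st.1 ++ [st.2] else st.1) = hunks ++ pvRef lines cur := by
  induction lines with
  | nil =>
    intro hunks cur
    simp only [List.foldl_nil, pvRef]
    split <;> simp
  | cons x xs ih =>
    intro hunks cur
    simp only [List.foldl_cons, pvRef]
    by_cases hx : PySem.Str.startswith x "@@" = true
    · simp only [hx, if_true]
      by_cases hc : cur ≠ []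
      · rw [if_pos hc, ih, if_pos hc]
        simp
      · have hc' : cur = [] := not_ne_iff.mp hc
        subst hc'
        rw [if_neg hc, ih, if_neg hc]
    · simp only [hx, Bool.false_eq_true, if_false]
      exact ih hunks (cur ++ [x])

-- non-marker run absorbed into the current hunk
lemma pvRef_run (run : List String) (h : ∀ y ∈ run, PySem.Str.startswith y "@@" = false) :
    ∀ (ys : List String) (cur : List String), pvRef (run ++ ys) cur = pvRef ys (cur ++ run) := by
  induction run with
  | nil => intro ys cur; simp
  | cons r rs ih =>
    intro ys cur
    have hr : PySem.Str.startswith r "@@" = false := h r (by simp)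
    simp only [List.cons_append, pvRef, hr, Bool.false_eq_true, if_false]
    rw [ih (fun y hy => h y (by simp [hy]))]
    simp
  
-- marker run skipped (with empty current)
lemma pvRef_markers (ms : List String) (h : ∀ y ∈ ms, PySem.Str.startswith y "@@" = true) :
    ∀ (ys : List String), pvRef (ms ++ ys) [] = pvRef ys [] := by
  induction ms with
  | nil => intro ys; simp
  | cons m ms ih =>
    intro ys
    have hm := h m (by simp)
    simp only [List.cons_append, pvRef, hm, if_true, ne_eq, not_true_eq_false, if_false]
    exact ih (fun y hy => h y (by simp [hy])) ys

lemma pvAlt_eq_ref (lines : List String) :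
    split_update_hunks_py_alt lines = pvRef lines [] := by
  unfold split_update_hunks_py_alt
  induction hn : lines.length using Nat.strong_induction_on generalizing lines with
  | _ n ih =>
    match lines with
    | [] => simp [pvGroupRuns, pvRef]
    | x :: xs =>
      rw [pvGroupRuns]
      simp only [List.span_eq_takeWhile_dropWhile]
      cases hx : PySem.Str.startswith x "@@" with
      | true =>
        -- marker run: the group is filtered out and the markers are skipped by pvRef
        have hlen : (xs.dropWhile (fun y => PySem.Str.startswith y "@@" == true)).length < n := by
          subst hn
          exact Nat.lt_succ_of_le (List.length_dropWhile_le _ _)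
        have htw : ∀ y ∈ xs.takeWhile (fun y => PySem.Str.startswith y "@@" == true),
            PySem.Str.startswith y "@@" = true := by
          intro y hy
          simpa using List.mem_takeWhile_imp hy
        rw [List.filter_cons_of_neg (by simp), ih _ hlen _ rfl]
        have hskip : pvRef (xs.dropWhile (fun y => PySem.Str.startswith y "@@" == true)) [] = pvRef xs [] := by
          conv_rhs => rw [← List.takeWhile_append_dropWhile
            (p := fun y => PySem.Str.startswith y "@@" == true) (l := xs)]
          exact (pvRef_markers _ htw _).symm
        rw [hskip, pvRef, hx]
        simp
      | false =>
        -- non-marker run: the group is kept and pvRef absorbs it into the current hunk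
        have hlen : (xs.dropWhile (fun y => PySem.Str.startswith y "@@" == false)).length < n := by
          subst hn
          exact Nat.lt_succ_of_le (List.length_dropWhile_le _ _)
        have htw : ∀ y ∈ xs.takeWhile (fun y => PySem.Str.startswith y "@@" == false),
            PySem.Str.startswith y "@@" = false := by
          intro y hy
          simpa using List.mem_takeWhile_imp hy
        rw [List.filter_cons_of_pos (by simp), List.map_cons, ih _ hlen _ rfl, pvRef, hx]
        simp only [Bool.false_eq_true, if_false]
        conv_rhs => rw [← List.takeWhile_append_dropWhile
          (p := fun y => PySem.Str.startswith y "@@" == false) (l := xs)]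
        rw [pvRef_run _ htw]
        cases hd : xs.dropWhile (fun y => PySem.Str.startswith y "@@" == false) with
        | nil => simp [pvRef]
        | cons m t =>
          have hm : PySem.Str.startswith m "@@" = true := by
            have hPm := List.head_dropWhile_not
              (p := fun y => PySem.Str.startswith y "@@" == false) (l := xs) (by rw [hd]; simp)
            simp only [hd, List.head_cons] at hPm
            simpa using hPm
          rw [pvRef, pvRef, hm]
          simp

-- ===== VERDICT (by name: the statement is the Claim_ definition above) =====
theorem split_update_hunks_py_spec : Claim_equal_split_update_hunks_py := by
  intro lines _
  unfold Spec_split_update_hunks_py split_update_hunks_py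
  rw [pvAlt_eq_ref]
  exact pvA_foldl lines [] []
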